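-- pv_equiv track=rewrite | github.com/wyk18703232953/myResearch | codeComplex/data copy/onlyCode/python/quadratic/python_quadratic_0546.py | stones_after
-- ===== SOURCE A (Python) =====
-- def stones_after(n, s):
-- 	for i in s:
-- 		if i == '-':
-- 			n -= 1
-- 		else:
-- 			n += 1
-- 		if n < 0:
-- 			return -1
-- 	return n
-- ===== SOURCE B (Python) =====
-- def stones_after(n, s):
--     # Two-pass: build the full prefix-sum table, then check its minimum.
--     prefixes = []
--     t = n
--     for c in s:
--         t += -1 if c == '-' else 1
--         prefixes.append(t)
--     if prefixes and min(prefixes) < 0: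
--         return -1
--     return prefixes[-1] if prefixes else n
-- ===== Notes on version B (the rewrite author's own statement) =====
-- stated objective: alternative
-- what changed: Replaces A's fused loop with early return by a two-pass decomposition: first materialise the full prefix-sum table, then a separate min() check decides -1 versus the final (last) prefix value.
import Mathlib
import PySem

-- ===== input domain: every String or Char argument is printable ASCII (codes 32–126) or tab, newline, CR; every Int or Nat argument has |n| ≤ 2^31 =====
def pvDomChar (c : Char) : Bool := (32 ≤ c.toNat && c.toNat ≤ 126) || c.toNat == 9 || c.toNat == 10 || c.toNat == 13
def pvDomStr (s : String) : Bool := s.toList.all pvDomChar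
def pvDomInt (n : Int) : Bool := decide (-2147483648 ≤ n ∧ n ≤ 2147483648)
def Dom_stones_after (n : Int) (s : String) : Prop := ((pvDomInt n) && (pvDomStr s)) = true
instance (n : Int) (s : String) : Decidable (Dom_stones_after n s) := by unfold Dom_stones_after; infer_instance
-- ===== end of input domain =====

-- B differs from A by decomposition: A is a single fused loop with an early return,
-- B builds the full prefix-sum table first and decides with a separate min pass.

-- ===== PORT A =====
def pvLoopA : Int → List Char → Int
  | n, [] => n
  | n, c :: rest =>
      let n' := if c == '-' then n - 1 else n + 1
      if n' < 0 then -1 else pvLoopA n' rest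

def stones_after (n : Int) (s : String) : Int := pvLoopA n s.toList

-- ===== PORT B =====
-- running-sum pass building the prefix table (Source B's first loop)
def pvPrefixes (t : Int) : List Int → List Int
  | [] => []
  | d :: ds => (t + d) :: pvPrefixes (t + d) ds

def stones_after_alt (n : Int) (s : String) : Int :=
  let prefixes := pvPrefixes n (s.toList.map (fun c => if c == '-' then (-1 : Int) else 1))
  match PySem.List.min? prefixes (fun x => x) with
  | none => n                                        -- empty string: return n
  | some m => if m < 0 then -1 else prefixes.getLastD n

-- ===== PRECONDITION & SPEC =====
def Spec_stones_after (n : Int) (s : String) (out : Int) : Prop := out = stones_after_alt n s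
instance (n : Int) (s : String) (out : Int) : Decidable (Spec_stones_after n s out) := by unfold Spec_stones_after; infer_instance

-- ===== CLAIM (what is proved, stated in full; the proofs are below) =====
def Claim_equal_stones_after : Prop := ∀ (n : Int) (s : String), Dom_stones_after n s → Spec_stones_after n s (stones_after n s)

-- ===== LEMMAS AND PROOFS =====

theorem pvLoopA_eq_alt (cs : List Char) : ∀ (n : Int),
    pvLoopA n cs =
      (let ps := pvPrefixes n (cs.map (fun c => if c == '-' then (-1 : Int) else 1))
       match PySem.List.min? ps (fun x => x) with
       | none => n
       | some m => if m < 0 then -1 else ps.getLastD n) := by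
  induction cs with
  | nil => intro n; simp [pvLoopA, pvPrefixes, PySem.List.min?]
  | cons c rest ih =>
    intro n
    have hd : n + (if c == '-' then (-1 : Int) else 1) = (if c == '-' then n - 1 else n + 1) := by
      split <;> ring
    simp only [pvLoopA, List.map_cons, pvPrefixes, hd]
    set n' : Int := if c == '-' then n - 1 else n + 1 with hn'
    set ps' : List Int := pvPrefixes n' (rest.map (fun c => if c == '-' then (-1 : Int) else 1)) with hps'
    rw [PySem.List.min?_id_cons]
    by_cases hneg : n' < 0
    · -- early return -1; min of the table is ≤ n' < 0
      have hmin : ps'.foldl min n' ≤ n' := by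
        have := PySem.List.min?_isMin (xs := n' :: ps') (key := fun x => x)
          (m := ps'.foldl min n') (by rw [PySem.List.min?_id_cons]) n' (by simp)
        exact this
      simp [hneg, show ps'.foldl min n' < 0 by omega]
    · -- continue: use IH at n'
      push Not at hneg
      simp only [if_neg (show ¬ n' < 0 by omega)]
      rw [ih n', ← hps']
      cases ps' with
      | nil => simp [PySem.List.min?, show ¬ n' < 0 by omega]
      | cons x t =>
        simp only [PySem.List.min?_id_cons]
        have hfold : (x :: t).foldl min n' = min n' (t.foldl min x) := by
          simpa [List.foldl_cons] using
            (List.foldl_assoc (op := min) (l := t) (a₁ := n') (a₂ := x))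
        rw [hfold, show ((n' : Int) :: x :: t).getLastD n = (x :: t).getLastD n' from List.getLastD_cons]
        by_cases hm : t.foldl min x < 0
        · simp [hm, show min n' (t.foldl min x) < 0 by omega]
        · simp [hm, show ¬ min n' (t.foldl min x) < 0 by omega]

-- ===== VERDICT (by name: the statement is the Claim_ definition above) =====
theorem stones_after_spec : Claim_equal_stones_after := by
  intro n s _
  unfold Spec_stones_after stones_after stones_after_alt
  exact pvLoopA_eq_alt s.toList n
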